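-- pv_equiv track=rewrite | github.com/Xelanos/ex5 | ex5.py | sum_basket
-- ===== SOURCE A (Python) =====
-- def sum_basket(price_list):
--     """
--     Receives a list of prices
--     Returns a tuple - the sum of the list (when ignoring Nones)
--       and the number of missing items (Number of Nones)
--
--     """
--     missing_items_counter = 0
--     basket_sum = 0  # starting value printed if all are None
--     for price in price_list:
--         if price is None:
--             missing_items_counter += 1
--         else:
--             basket_sum += price
--     return basket_sum, missing_items_counter
-- ===== SOURCE B (Python) =====
-- def sum_basket(price_list):
--     # Divide and conquer: split the list in half, solve each half recursively,
--     # combine the (sum, missing) pairs.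
--     n = len(price_list)
--     if n == 0:
--         return 0, 0
--     if n == 1:
--         p = price_list[0]
--         if p is None:
--             return 0, 1
--         return p, 0
--     mid = n // 2
--     s1, m1 = sum_basket(price_list[:mid])
--     s2, m2 = sum_basket(price_list[mid:])
--     return s1 + s2, m1 + m2
-- ===== Notes on version B (the rewrite author's own statement) =====
-- stated objective: alternative
-- what changed: Replaces A's single accumulator loop by a divide-and-conquer recursion that splits the list in half, solves each half recursively, and adds the (sum, missing) pairs.
import Mathlib
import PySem

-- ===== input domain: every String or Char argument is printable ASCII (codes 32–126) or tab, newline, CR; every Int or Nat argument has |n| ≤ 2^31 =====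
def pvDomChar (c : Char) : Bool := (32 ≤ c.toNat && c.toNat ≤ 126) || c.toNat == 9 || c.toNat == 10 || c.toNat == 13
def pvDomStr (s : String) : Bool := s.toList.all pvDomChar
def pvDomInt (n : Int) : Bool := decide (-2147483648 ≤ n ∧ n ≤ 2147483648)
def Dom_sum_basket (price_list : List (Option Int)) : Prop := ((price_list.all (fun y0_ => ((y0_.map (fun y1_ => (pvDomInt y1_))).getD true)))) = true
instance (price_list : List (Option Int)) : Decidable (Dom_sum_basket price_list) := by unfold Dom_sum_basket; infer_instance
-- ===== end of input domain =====

-- B replaces A's single fused accumulator loop by a divide-and-conquer recursion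
-- (split at the midpoint, recurse on both halves, add the pairs); objective: alternative.

-- ===== PORT A =====
-- A: one loop carrying (basket_sum, missing_items_counter); branch order as in the Python.
def sum_basket (price_list : List (Option Int)) : Int × Int :=
  let st := price_list.foldl
    (fun (acc : Int × Int) price =>
      match price with
      | none => (acc.1, acc.2 + 1)
      | some p => (acc.1 + p, acc.2))
    (0, 0)
  (st.1, st.2)

-- ===== PORT B =====
-- B: divide and conquer; price_list[:mid] / price_list[mid:] with 0 ≤ mid ≤ n are
-- exactly List.take mid / List.drop mid, and n // 2 on a nonnegative n is Nat division.
def sum_basket_alt (price_list : List (Option Int)) : Int × Int :=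
  match price_list with
  | [] => (0, 0)
  | [p] =>
    match p with
    | none => (0, 1)
    | some x => (x, 0)
  | a :: b :: rest =>
    match sum_basket_alt ((a :: b :: rest).take ((a :: b :: rest).length / 2)),
          sum_basket_alt ((a :: b :: rest).drop ((a :: b :: rest).length / 2)) with
    | (s1, m1), (s2, m2) => (s1 + s2, m1 + m2)
termination_by price_list.length
decreasing_by
  · simp; omega
  · simp; omega

-- ===== PRECONDITION & SPEC =====
def Spec_sum_basket (price_list : List (Option Int)) (out : Int × Int) : Prop := out = sum_basket_alt price_list
instance (price_list : List (Option Int)) (out : Int × Int) : Decidable (Spec_sum_basket price_list out) := by unfold Spec_sum_basket; infer_instance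

-- ===== CLAIM (what is proved, stated in full; the proofs are below) =====
def Claim_equal_sum_basket : Prop := ∀ (price_list : List (Option Int)), Dom_sum_basket price_list → Spec_sum_basket price_list (sum_basket price_list)

-- ===== LEMMAS AND PROOFS =====
-- Common closed form: sum of the non-None entries and the number of Nones.
def pvF (l : List (Option Int)) : Int × Int :=
  ((l.filterMap id).sum, ((l.filter (fun p => p.isNone)).length : Int))

theorem pvF_append (l₁ l₂ : List (Option Int)) :
    pvF (l₁ ++ l₂) = ((pvF l₁).1 + (pvF l₂).1, (pvF l₁).2 + (pvF l₂).2) := by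
  simp [pvF]

theorem sum_basket_alt_eq_pvF (l : List (Option Int)) : sum_basket_alt l = pvF l := by
  fun_induction sum_basket_alt l with
  | case1 => simp [pvF]
  | case2 => simp [pvF]
  | case3 x => simp [pvF]
  | case4 a b rest s1 m1 s2 m2 h2 h1 ih1 ih2 =>
    rw [ih1] at h1; rw [ih2] at h2
    have h := pvF_append ((a :: b :: rest).take ((a :: b :: rest).length / 2))
      ((a :: b :: rest).drop ((a :: b :: rest).length / 2))
    rw [List.take_append_drop, h1, h2] at h
    rw [h]

theorem sum_basket_fold (l : List (Option Int)) (s m : Int) :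
    l.foldl
      (fun (acc : Int × Int) price =>
        match price with
        | none => (acc.1, acc.2 + 1)
        | some p => (acc.1 + p, acc.2))
      (s, m)
    = (s + (pvF l).1, m + (pvF l).2) := by
  induction l generalizing s m with
  | nil => simp [pvF]
  | cons hd tl ih =>
    cases hd with
    | none => simp [List.foldl, ih, pvF, List.filter]; ring
    | some p => simp [List.foldl, ih, pvF, List.filter]; ring

-- ===== VERDICT (by name: the statement is the Claim_ definition above) =====
theorem sum_basket_spec : Claim_equal_sum_basket := by
  intro l _
  unfold Spec_sum_basket sum_basket
  rw [sum_basket_alt_eq_pvF, sum_basket_fold]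
  simp
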